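-- pv_equiv track=rewrite | github.com/enrique-yoab/JuegoGatopython | components/IA_machine.py | evaluation_line
-- ===== SOURCE A (Python) =====
-- def evaluation_cell(celda, symbolU, symbolM):
--     if celda == symbolM:
--         return 10  #el peso para el simbolo de la Maquina
--     if celda == symbolU:
--         return -10 # el peso para el simbolo del usuario
--     else:
--         return 5   #peso para la celda vacia
--
-- def evaluation_line(board, symbolU, symbolM, total_cost):
--     plays_line = []
--     for row in range(len(board)):
--         for col in range(len(board[0])-2):
--             valores = [board[row][col] , board[row][col + 1] , board[row][col + 2]]
--             costo=0
--             for celda in valores: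
--                 costo+=evaluation_cell(celda, symbolU, symbolM)
--             #guardamos las posiciones de la jugada 1x3 y su costo
--             plays_line.append((( (row,col), (row,col+1), (row,col+2)), costo))
--             total_cost+=costo
--     return total_cost, plays_line
-- ===== SOURCE B (Python) =====
-- def evaluation_cell(celda, symbolU, symbolM):
--     if celda == symbolM:
--         return 10
--     if celda == symbolU:
--         return -10
--     else:
--         return 5
--
-- def evaluation_line(board, symbolU, symbolM, total_cost):
--     plays_line = []
--     width = len(board[0]) if board else 0
--     for row, cells in enumerate(board):
--         # one pass: prefix sums of the row's cell values
--         prefix = [0]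
--         acc = 0
--         for celda in cells:
--             acc += evaluation_cell(celda, symbolU, symbolM)
--             prefix.append(acc)
--         # each 1x3 window cost is a prefix difference
--         for col in range(width - 2):
--             costo = prefix[col + 3] - prefix[col]
--             plays_line.append((((row, col), (row, col + 1), (row, col + 2)), costo))
--             total_cost += costo
--     return total_cost, plays_line
-- ===== Notes on version B (the rewrite author's own statement) =====
-- stated objective: alternative
-- what changed: Replaces the per-window 3-cell re-summation (triple nested loop with a list rebuild per window) by one prefix-sum pass per row and a window cost computed as a prefix difference.
import Mathlib
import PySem

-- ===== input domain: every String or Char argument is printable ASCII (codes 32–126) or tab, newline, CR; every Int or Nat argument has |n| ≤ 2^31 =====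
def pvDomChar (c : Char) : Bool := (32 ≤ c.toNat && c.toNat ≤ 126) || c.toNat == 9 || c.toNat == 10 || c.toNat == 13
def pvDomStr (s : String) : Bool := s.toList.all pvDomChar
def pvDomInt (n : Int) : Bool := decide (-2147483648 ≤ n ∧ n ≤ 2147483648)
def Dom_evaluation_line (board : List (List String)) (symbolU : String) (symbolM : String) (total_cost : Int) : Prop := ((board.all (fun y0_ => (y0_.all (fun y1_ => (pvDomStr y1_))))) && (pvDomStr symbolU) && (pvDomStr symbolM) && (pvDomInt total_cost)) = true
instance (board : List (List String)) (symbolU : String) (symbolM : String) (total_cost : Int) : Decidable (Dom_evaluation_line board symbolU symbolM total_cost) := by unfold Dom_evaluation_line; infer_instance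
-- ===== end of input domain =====

-- B replaces A's per-window 3-cell re-summation by one prefix-sum pass per row
-- and a window cost computed as a prefix difference (objective: alternative).

-- ===== PORT A =====
def evaluation_cell (celda : String) (symbolU : String) (symbolM : String) : Int :=
  if celda == symbolM then 10
  else if celda == symbolU then -10
  else 5

-- indexing is via pyGetD with a dummy default; exact under Pre_ (all indices in range there)
def evaluation_line (board : List (List String)) (symbolU : String) (symbolM : String) (total_cost : Int) : Int × (List (((Int × Int) × (Int × Int) × (Int × Int)) × Int)) :=
  (PySem.List.pyRange 0 (board.length : Int) 1).foldl (fun st row =>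
    (PySem.List.pyRange 0 (((board.headD []).length : Int) - 2) 1).foldl (fun st col =>
      let valores := [PySem.List.pyGetD (PySem.List.pyGetD board row []) col "",
                      PySem.List.pyGetD (PySem.List.pyGetD board row []) (col + 1) "",
                      PySem.List.pyGetD (PySem.List.pyGetD board row []) (col + 2) ""]
      let costo := valores.foldl (fun c celda => c + evaluation_cell celda symbolU symbolM) 0
      (st.1 + costo, st.2 ++ [(((row, col), (row, col + 1), (row, col + 2)), costo)])) st)
    (total_cost, [])

-- ===== PORT B =====
def evaluation_line_alt (board : List (List String)) (symbolU : String) (symbolM : String) (total_cost : Int) : Int × (List (((Int × Int) × (Int × Int) × (Int × Int)) × Int)) :=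
  let width : Int := ((board.headD []).length : Int)
  (PySem.List.enumerate board 0).foldl (fun st rc =>
    let row := rc.1
    let cells := rc.2
    let pa := cells.foldl (fun (pa : List Int × Int) celda =>
        let acc := pa.2 + evaluation_cell celda symbolU symbolM
        (pa.1 ++ [acc], acc)) ([0], 0)
    let pre := pa.1
    (PySem.List.pyRange 0 (width - 2) 1).foldl (fun st col =>
      let costo := PySem.List.pyGetD pre (col + 3) 0 - PySem.List.pyGetD pre col 0
      (st.1 + costo, st.2 ++ [(((row, col), (row, col + 1), (row, col + 2)), costo)])) st)
    (total_cost, [])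

-- ===== PRECONDITION & SPEC =====
-- Pre_ excludes exactly the inputs where Python A raises IndexError: boards whose
-- first row has ≥ 3 cells but some row is shorter than the first row.
def Pre_evaluation_line (board : List (List String)) (symbolU : String) (symbolM : String) (total_cost : Int) : Prop :=
  (board.headD []).length < 3 ∨ ∀ r ∈ board, (board.headD []).length ≤ r.length
instance (board : List (List String)) (symbolU : String) (symbolM : String) (total_cost : Int) : Decidable (Pre_evaluation_line board symbolU symbolM total_cost) := by unfold Pre_evaluation_line; infer_instance

def pvWitness_evaluation_line : List (List String) × String × String × Int :=
  ([["x", "o", " "], ["o", "x", "x"]], "x", "o", 0)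

def Spec_evaluation_line (board : List (List String)) (symbolU : String) (symbolM : String) (total_cost : Int) (out : Int × (List (((Int × Int) × (Int × Int) × (Int × Int)) × Int))) : Prop := out = evaluation_line_alt board symbolU symbolM total_cost
instance (board : List (List String)) (symbolU : String) (symbolM : String) (total_cost : Int) (out : Int × (List (((Int × Int) × (Int × Int) × (Int × Int)) × Int))) : Decidable (Spec_evaluation_line board symbolU symbolM total_cost out) := by unfold Spec_evaluation_line; infer_instance

-- ===== CLAIM (what is proved, stated in full; the proofs are below) =====
def Claim_equal_evaluation_line : Prop := ∀ (board : List (List String)) (symbolU : String) (symbolM : String) (total_cost : Int), Dom_evaluation_line board symbolU symbolM total_cost → Pre_evaluation_line board symbolU symbolM total_cost → Spec_evaluation_line board symbolU symbolM total_cost (evaluation_line board symbolU symbolM total_cost)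

-- ===== LEMMAS AND PROOFS =====

-- prefix-sum characterisation of B's row pass
theorem pv_prefix_build (U M : String) : ∀ (cells : List String) (p : List Int) (a : Int),
    cells.foldl (fun (pa : List Int × Int) celda =>
        (pa.1 ++ [pa.2 + evaluation_cell celda U M], pa.2 + evaluation_cell celda U M)) (p, a)
    = (p ++ (List.range cells.length).map
        (fun i => a + ((cells.take (i + 1)).map (fun c => evaluation_cell c U M)).sum),
       a + ((cells.map (fun c => evaluation_cell c U M)).sum)) := by
  intro cells
  induction cells with
  | nil => intro p a; simp
  | cons c cs ih =>
    intro p a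
    simp only [List.foldl_cons, ih, List.length_cons, List.range_succ_eq_map]
    refine Prod.ext ?_ ?_ <;>
      simp [List.map_map, Function.comp, List.take_succ_cons, List.append_assoc, add_assoc]

-- per-row prefix lookup: the c-th prefix entry is the sum of the first c cell values
theorem pv_pre_get_nat (U M : String) (cells : List String) (k : Nat)
    (h : k < ((0 : Int) :: (List.range cells.length).map
        (fun i => 0 + ((cells.take (i + 1)).map (fun s => evaluation_cell s U M)).sum)).length) :
    ((0 : Int) :: (List.range cells.length).map
        (fun i => 0 + ((cells.take (i + 1)).map (fun s => evaluation_cell s U M)).sum))[k]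
    = ((cells.take k).map (fun s => evaluation_cell s U M)).sum := by
  cases k with
  | zero => simp
  | succ n =>
    rw [List.getElem_cons_succ, List.getElem_map, List.getElem_range, zero_add]

theorem pv_pre_get (U M : String) (cells : List String) (c : Int) (h0 : 0 ≤ c)
    (hc : c ≤ (cells.length : Int)) :
    PySem.List.pyGetD
      ([(0 : Int)] ++ (List.range cells.length).map
        (fun i => 0 + ((cells.take (i + 1)).map (fun s => evaluation_cell s U M)).sum)) c 0
    = ((cells.take c.toNat).map (fun s => evaluation_cell s U M)).sum := by
  rw [PySem.List.pyGetD_eq_getElem _ 0 h0 (by simp; omega)]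
  simp only [List.singleton_append]
  exact pv_pre_get_nat U M cells c.toNat (by simp; omega)

-- one step of the running sum
theorem pv_take_succ (U M : String) (cells : List String) (k : Nat) (hk : k < cells.length) :
    ((cells.take (k + 1)).map (fun s => evaluation_cell s U M)).sum
    = ((cells.take k).map (fun s => evaluation_cell s U M)).sum + evaluation_cell cells[k] U M := by
  rw [List.take_add_one, List.getElem?_eq_getElem hk]
  simp only [Option.toList_some, List.map_append, List.map_cons, List.map_nil,
    List.sum_append, List.sum_cons, List.sum_nil, add_zero]

-- A's inner row loop equals B's prefix-difference row loop
theorem pv_row (U M : String) (w : Int) (cells : List String) (row : Int)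
    (h : 3 ≤ w → w ≤ (cells.length : Int)) (st : Int × List (((Int × Int) × (Int × Int) × (Int × Int)) × Int)) :
    (PySem.List.pyRange 0 (w - 2) 1).foldl (fun st col =>
      let valores := [PySem.List.pyGetD cells col "", PySem.List.pyGetD cells (col + 1) "",
                      PySem.List.pyGetD cells (col + 2) ""]
      let costo := valores.foldl (fun c celda => c + evaluation_cell celda U M) 0
      (st.1 + costo, st.2 ++ [(((row, col), (row, col + 1), (row, col + 2)), costo)])) st
    = (let pa := cells.foldl (fun (pa : List Int × Int) celda =>
          let acc := pa.2 + evaluation_cell celda U M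
          (pa.1 ++ [acc], acc)) ([0], 0)
       (PySem.List.pyRange 0 (w - 2) 1).foldl (fun st col =>
        let costo := PySem.List.pyGetD pa.1 (col + 3) 0 - PySem.List.pyGetD pa.1 col 0
        (st.1 + costo, st.2 ++ [(((row, col), (row, col + 1), (row, col + 2)), costo)])) st) := by
  by_cases h3 : 3 ≤ w
  · have hlen : w ≤ (cells.length : Int) := h h3
    simp only [pv_prefix_build U M cells [0] 0, zero_add]
    refine PySem.List.foldl_congr_mem _ _ _ _ (fun acc col hcol => ?_)
    rw [PySem.List.mem_pyRange_one] at hcol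
    obtain ⟨hcol0, hcolw⟩ := hcol
    have e1 : PySem.List.pyGetD
        ([(0 : Int)] ++ (List.range cells.length).map
          (fun i => 0 + ((cells.take (i + 1)).map (fun s => evaluation_cell s U M)).sum)) col 0
        = ((cells.take col.toNat).map (fun s => evaluation_cell s U M)).sum :=
      pv_pre_get U M cells col hcol0 (by omega)
    have e2 : PySem.List.pyGetD
        ([(0 : Int)] ++ (List.range cells.length).map
          (fun i => 0 + ((cells.take (i + 1)).map (fun s => evaluation_cell s U M)).sum)) (col + 3) 0
        = ((cells.take (col + 3).toNat).map (fun s => evaluation_cell s U M)).sum :=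
      pv_pre_get U M cells (col + 3) (by omega) (by omega)
    simp only [zero_add] at e1 e2
    simp only [e1, e2]
    have hk0 : col.toNat < cells.length := by omega
    have hk1 : col.toNat + 1 < cells.length := by omega
    have hk2 : col.toNat + 2 < cells.length := by omega
    have ht : (col + 3).toNat = col.toNat + 2 + 1 := by omega
    have g0 : PySem.List.pyGetD cells col "" = cells[col.toNat] := by
      rw [PySem.List.pyGetD_eq_getElem _ "" hcol0 (by omega)]
    have g1 : PySem.List.pyGetD cells (col + 1) "" = cells[col.toNat + 1] := by
      rw [PySem.List.pyGetD_eq_getElem _ "" (by omega) (by omega)]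
      congr 1; omega
    have g2 : PySem.List.pyGetD cells (col + 2) "" = cells[col.toNat + 2] := by
      rw [PySem.List.pyGetD_eq_getElem _ "" (by omega) (by omega)]
      congr 1; omega
    have hcost : (((0 : Int) + evaluation_cell cells[col.toNat] U M)
          + evaluation_cell cells[col.toNat + 1] U M) + evaluation_cell cells[col.toNat + 2] U M
        = ((cells.take (col + 3).toNat).map (fun s => evaluation_cell s U M)).sum
          - ((cells.take col.toNat).map (fun s => evaluation_cell s U M)).sum := by
      rw [ht]
      have hA : ((cells.take (col.toNat + 2 + 1)).map (fun s => evaluation_cell s U M)).sum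
          = ((cells.take (col.toNat + 2)).map (fun s => evaluation_cell s U M)).sum
            + evaluation_cell cells[col.toNat + 2] U M :=
        pv_take_succ U M cells (col.toNat + 2) hk2
      have hB : ((cells.take (col.toNat + 2)).map (fun s => evaluation_cell s U M)).sum
          = ((cells.take (col.toNat + 1)).map (fun s => evaluation_cell s U M)).sum
            + evaluation_cell cells[col.toNat + 1] U M :=
        pv_take_succ U M cells (col.toNat + 1) hk1
      have hC : ((cells.take (col.toNat + 1)).map (fun s => evaluation_cell s U M)).sum
          = ((cells.take col.toNat).map (fun s => evaluation_cell s U M)).sum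
            + evaluation_cell cells[col.toNat] U M :=
        pv_take_succ U M cells col.toNat hk0
      rw [hA, hB, hC]; ring
    simp only [List.foldl_cons, List.foldl_nil, g0, g1, g2, hcost]
  · rw [PySem.List.pyRange_one_eq_nil (by omega)]
    simp

-- ===== VERDICT (by name: the statement is the Claim_ definition above) =====
theorem evaluation_line_spec : Claim_equal_evaluation_line := by
  intro board symbolU symbolM total_cost _hDom hPre
  unfold Spec_evaluation_line evaluation_line evaluation_line_alt
  rw [PySem.List.enumerate_eq_map_pyRange board ([] : List String), List.foldl_map]
  simp only [PySem.List.len_eq]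
  refine PySem.List.foldl_congr_mem _ _ _ _ (fun st row hrow => ?_)
  rw [PySem.List.mem_pyRange_one] at hrow
  obtain ⟨hr0, hrn⟩ := hrow
  have hmem : PySem.List.pyGetD board row [] ∈ board := by
    rw [PySem.List.pyGetD_eq_getElem _ ([] : List String) hr0 (by omega)]
    exact List.getElem_mem _
  have hlen : 3 ≤ (((board.headD []).length : Int)) →
      ((board.headD []).length : Int) ≤ ((PySem.List.pyGetD board row []).length : Int) := by
    intro h3
    rcases hPre with h | h
    · omega
    · exact_mod_cast Int.ofNat_le.mpr (h _ hmem)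
  exact pv_row symbolU symbolM _ _ row hlen st
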